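-- pv_equiv track=rewrite | github.com/theofahey/Ties__tfahey20_sging20_ekrechmer20_ilam21 | app/main.py | replace
-- ===== SOURCE A (Python) =====
-- def replace(story, words):
--     '''
--     Input str story with # in place of blanks and str[] words
--     Replaces # with words
--     Returns the story with replaces words
--     '''
--     output = ""
--     for x in story:
--         if x == "#":
--             if len(words[0]) != 0:
--                 output += words.pop(0)
--             else:
--                 output += "____"
--                 words.pop(0)
--         else:
--             output += x
--
--     return output
-- ===== SOURCE B (Python) =====
-- def replace(story, words):
--     parts = story.split('#')
--     output = parts[0]
--     for seg in parts[1:]: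
--         word = words.pop(0)
--         output += ('____' if word == '' else word) + seg
--     return output
-- ===== Notes on version B (the rewrite author's own statement) =====
-- stated objective: simpler
-- what changed: Replaces the char-by-char loop with quadratic string accumulation by a split('#')-then-interleave pass that pops one word per gap; mutation of words and IndexError behaviour are unchanged.
import Mathlib
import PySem

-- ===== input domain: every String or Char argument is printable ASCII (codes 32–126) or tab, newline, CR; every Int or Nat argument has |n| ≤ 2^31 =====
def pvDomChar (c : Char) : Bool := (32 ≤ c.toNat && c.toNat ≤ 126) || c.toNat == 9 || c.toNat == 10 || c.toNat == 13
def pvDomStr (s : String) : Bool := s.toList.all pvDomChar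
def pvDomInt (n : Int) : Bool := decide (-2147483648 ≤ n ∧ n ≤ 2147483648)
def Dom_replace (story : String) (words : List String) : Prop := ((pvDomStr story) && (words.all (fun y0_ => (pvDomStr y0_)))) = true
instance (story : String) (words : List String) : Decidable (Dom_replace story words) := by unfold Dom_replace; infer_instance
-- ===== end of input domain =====

-- B replaces A's char-by-char accumulation by a split('#')-then-interleave pass (simpler);
-- both A and B pop one word from `words` per '#' (same in-place mutation); equivalence is about the return value.


-- ===== PORT A =====
-- A's loop over the characters of `story` with state (remaining words, output so far);
-- the `[]` branch at a '#' is Python's IndexError on `words[0]`, excluded by Pre_replace.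
def replaceLoopA : List Char → List String → List Char → List Char
  | [], _, out => out
  | c :: cs, ws, out =>
    if c = '#' then
      match ws with
      | [] => out            -- IndexError in Python; outside Pre_replace
      | w :: rest =>
        if w.toList.length ≠ 0 then replaceLoopA cs rest (out ++ w.toList)
        else replaceLoopA cs rest (out ++ "____".toList)
    else replaceLoopA cs ws (out ++ [c])

def replace (story : String) (words : List String) : String :=
  String.ofList (replaceLoopA story.toList words [])

-- ===== PORT B =====
-- B's loop over the segments after the first, popping one word per segment;
-- the `[]` words branch is Python's IndexError on words.pop(0), excluded by Pre_replace.
def replaceLoopB : List (List Char) → List String → List Char → List Char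
  | [], _, out => out
  | seg :: rest, ws, out =>
    match ws with
    | [] => out              -- IndexError in Python; outside Pre_replace
    | w :: wrest =>
      replaceLoopB rest wrest (out ++ (if w.toList = [] then "____".toList else w.toList) ++ seg)

def replace_alt (story : String) (words : List String) : String :=
  match PySem.Chars.splitOn story.toList ['#'] with
  | [] => ""                 -- unreachable: split never returns an empty list
  | p0 :: ps => String.ofList (replaceLoopB ps words p0)

-- ===== PRECONDITION & SPEC =====
-- Pre_: at least as many words as '#' gaps; otherwise Python A (and B) raises IndexError.
def Pre_replace (story : String) (words : List String) : Prop :=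
  story.toList.count '#' ≤ words.length
instance (story : String) (words : List String) : Decidable (Pre_replace story words) := by
  unfold Pre_replace; infer_instance

def pvWitness_replace : String × List String := ("a# and #!", ["big", ""])

def Spec_replace (story : String) (words : List String) (out : String) : Prop := out = replace_alt story words
instance (story : String) (words : List String) (out : String) : Decidable (Spec_replace story words out) := by unfold Spec_replace; infer_instance

-- ===== CLAIM (what is proved, stated in full; the proofs are below) =====
def Claim_equal_replace : Prop := ∀ (story : String) (words : List String), Dom_replace story words → Pre_replace story words → Spec_replace story words (replace story words)

-- ===== LEMMAS AND PROOFS =====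

-- proof-side characterisation of split('#') as a structural recursion
def hashSplit : List Char → List (List Char)
  | [] => [[]]
  | c :: cs => if c = '#' then [] :: hashSplit cs else (hashSplit cs).modifyHead (c :: ·)

theorem hashSplit_ne_nil : ∀ (cs : List Char), hashSplit cs ≠ []
  | [] => by simp [hashSplit]
  | c :: cs => by
    simp only [hashSplit]
    split_ifs
    · simp
    · cases hs : hashSplit cs with
      | nil => exact absurd hs (hashSplit_ne_nil cs)
      | cons p ps => simp

theorem splitOn_go_hash (fuel : Nat) : ∀ (l cur : List Char) (acc : List (List Char)),
    l.length < fuel →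
    PySem.Chars.splitOn.go ['#'] fuel l cur acc
      = acc.reverse ++ (hashSplit l).modifyHead (cur.reverse ++ ·) := by
  induction fuel with
  | zero => intro l cur acc h; omega
  | succ fuel ih =>
    intro l cur acc h
    cases l with
    | nil => simp [PySem.Chars.splitOn.go, hashSplit]
    | cons c rest =>
      rw [PySem.Chars.splitOn.go]
      by_cases hc : c = '#'
      · subst hc
        have hpre : List.isPrefixOf ['#'] ('#' :: rest) = true := by
          simp [List.isPrefixOf]
        simp only [hpre, if_pos, List.length_cons, List.length_nil, List.drop_succ_cons, List.drop_zero]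
        rw [ih rest [] (cur.reverse :: acc) (by simpa using Nat.lt_of_succ_lt_succ h)]
        cases hs : hashSplit rest with
        | nil => exact absurd hs (hashSplit_ne_nil rest)
        | cons p ps => simp [hashSplit, hs, List.modifyHead]
      · have hpre : List.isPrefixOf ['#'] (c :: rest) = false := by
          simp only [List.isPrefixOf, Bool.and_eq_false_iff, beq_eq_false_iff_ne, ne_eq]
          exact Or.inl fun h' => hc h'.symm
        simp only [hpre, Bool.false_eq_true, if_false]
        rw [ih rest (c :: cur) acc (by simpa using Nat.lt_of_succ_lt_succ h)]
        cases hs : hashSplit rest with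
        | nil => exact absurd hs (hashSplit_ne_nil rest)
        | cons p ps => simp [hashSplit, hs, hc, List.modifyHead]

theorem splitOn_hash (cs : List Char) :
    PySem.Chars.splitOn cs ['#'] = hashSplit cs := by
  unfold PySem.Chars.splitOn
  rw [splitOn_go_hash (cs.length + 1) cs [] [] (by omega)]
  cases hs : hashSplit cs <;> simp

theorem loop_eq : ∀ (cs : List Char) (ws : List String) (out : List Char),
    cs.count '#' ≤ ws.length →
    replaceLoopA cs ws out
      = replaceLoopB (hashSplit cs).tail ws (out ++ (hashSplit cs).headI) := by
  intro cs
  induction cs with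
  | nil => intro ws out _; simp [replaceLoopA, hashSplit, replaceLoopB]
  | cons c cs ih =>
    intro ws out hcount
    by_cases hc : c = '#'
    · subst hc
      cases ws with
      | nil => simp at hcount
      | cons w rest =>
        have hcount' : cs.count '#' ≤ rest.length := by
          simp at hcount; omega
        cases hs : hashSplit cs with
        | nil => exact absurd hs (hashSplit_ne_nil cs)
        | cons p ps =>
          simp only [replaceLoopA, if_pos, hashSplit, hs, List.tail_cons, List.headI,
            List.append_nil, replaceLoopB]
          have ihw := ih rest (out ++ (if w.toList = [] then "____".toList else w.toList)) hcount'
          rw [hs] at ihw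
          by_cases hw : w.toList = []
          · simp only [hw, List.length_nil, ne_eq, not_true_eq_false, if_false, if_pos] at *
            simpa using ihw
          · have hlen : w.toList.length ≠ 0 := by simpa using hw
            simp only [hlen, ne_eq, not_false_eq_true, if_pos, hw, if_neg] at *
            simpa using ihw
    · have hcount' : cs.count '#' ≤ ws.length := by
        simp [hc] at hcount ⊢; omega
      cases hs : hashSplit cs with
      | nil => exact absurd hs (hashSplit_ne_nil cs)
      | cons p ps =>
        simp only [replaceLoopA, hc, hashSplit, hs, List.modifyHead, List.headI]
        have ihw := ih ws (out ++ [c]) hcount'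
        rw [hs] at ihw
        simpa using ihw

-- ===== VERDICT (by name: the statement is the Claim_ definition above) =====
theorem replace_spec : Claim_equal_replace := by
  intro story words _ hpre
  unfold Spec_replace replace replace_alt
  rw [splitOn_hash]
  cases hs : hashSplit story.toList with
  | nil => exact absurd hs (hashSplit_ne_nil story.toList)
  | cons p ps =>
    have hl := loop_eq story.toList words [] hpre
    rw [hs] at hl
    simp only [List.tail_cons, List.headI, List.nil_append] at hl
    rw [hl]
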